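-- pv_equiv track=rewrite | github.com/DrShIkIgAmy/CodeRockBattle | tasks/task_12.py | find_pathcount
-- ===== SOURCE A (Python) =====
-- def find_pathcount(graph, cur_node = 1, explored_nodes =0, searched_len = 6):
--     explored_nodes += 1
--     if not (cur_node in graph):
--         if explored_nodes >= searched_len:
--             return 1
--         else:
--             return 0
--     paths_founded = 0
--     for i in graph[cur_node]:
--         paths_founded += find_pathcount(graph, cur_node= i, explored_nodes= explored_nodes)
--
--     return paths_founded
-- ===== SOURCE B (Python) =====
-- def find_pathcount(graph, cur_node=1, explored_nodes=0, searched_len=6):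
--     depth = explored_nodes + 1
--     if cur_node not in graph:
--         return 1 if depth >= searched_len else 0
--     # Recursive calls in the original reset the threshold to its default 6,
--     # so inner terminals are counted against 6, not searched_len.
--     total = 0
--     frontier = {cur_node: 1}
--     while frontier:
--         depth += 1
--         nxt = {}
--         for node, cnt in frontier.items():
--             for nb in graph[node]:
--                 if nb in graph:
--                     nxt[nb] = nxt.get(nb, 0) + cnt
--                 elif depth >= 6:
--                     total += cnt
--         frontier = nxt
--     return total
-- ===== Notes on version B (the rewrite author's own statement) =====
-- stated objective: alternative
-- what changed: Replaces the path-per-call recursion by an iterative level-by-level count that keeps a dict mapping each live node to the number of paths reaching it, adding a node's count to the total when an out-of-graph neighbour is reached at depth >= 6 (the recursive calls of A reset the threshold to the default 6, which B reproduces); merging counts per node avoids A's blow-up when many paths share nodes, though a timing run's input family showed no measured speed difference.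
import Mathlib
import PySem

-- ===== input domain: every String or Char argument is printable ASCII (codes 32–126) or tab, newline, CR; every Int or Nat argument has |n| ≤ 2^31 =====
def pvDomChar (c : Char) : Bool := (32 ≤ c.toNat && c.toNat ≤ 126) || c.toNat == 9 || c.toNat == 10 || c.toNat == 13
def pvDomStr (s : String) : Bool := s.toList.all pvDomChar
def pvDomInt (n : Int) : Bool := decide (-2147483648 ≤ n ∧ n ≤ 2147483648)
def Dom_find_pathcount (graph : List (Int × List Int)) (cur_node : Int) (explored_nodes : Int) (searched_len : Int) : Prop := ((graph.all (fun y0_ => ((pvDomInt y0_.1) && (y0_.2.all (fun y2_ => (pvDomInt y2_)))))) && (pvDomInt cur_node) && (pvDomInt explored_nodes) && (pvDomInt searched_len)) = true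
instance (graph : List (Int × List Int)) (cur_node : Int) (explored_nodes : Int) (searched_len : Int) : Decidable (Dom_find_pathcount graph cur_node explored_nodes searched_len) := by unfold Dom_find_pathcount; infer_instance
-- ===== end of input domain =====

-- B replaces A's path-per-call recursion by an iterative per-level count (a dict node ↦ number of
-- paths reaching it, merged per level); Pre_ excludes only inputs on which A raises
-- RecursionError (a cycle reachable from cur_node).


-- ===== PORT A =====
-- Literal port of A; the fuel argument only totalizes the recursion (under Pre_ it never runs out:
-- a repetition-free chain of dict keys has length ≤ graph.length).  Note the recursive call passes
-- the DEFAULT searched_len = 6, exactly as A does.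
def fpA (g : List (Int × List Int)) (fuel : Nat) (cur_node explored_nodes searched_len : Int) : Int :=
  match g.find? (fun kv => kv.1 == cur_node) with
  | none => if explored_nodes + 1 ≥ searched_len then 1 else 0
  | some kv =>
    match fuel with
    | 0 => 0
    | f + 1 => kv.2.foldl (fun acc i => acc + fpA g f i (explored_nodes + 1) 6) 0
termination_by fuel

def find_pathcount (graph : List (Int × List Int)) (cur_node : Int) (explored_nodes : Int) (searched_len : Int) : Int :=
  fpA graph (graph.length + 1) cur_node explored_nodes searched_len

-- ===== PORT B =====
-- inner loop body of Source B: for nb in graph[node]: …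
def bVisit (g : List (Int × List Int)) (depth : Int) (st : Int × PySem.Dict Int Int)
    (p : Int × Int) : Int × PySem.Dict Int Int :=
  let nbrs : List Int :=
    match g.find? (fun kv => kv.1 == p.1) with | some kv => kv.2 | none => []
  nbrs.foldl
    (fun (st2 : Int × PySem.Dict Int Int) nb =>
      if (g.find? (fun kv => kv.1 == nb)).isSome then
        (st2.1, st2.2.insert nb (st2.2.getD nb 0 + p.2))
      else if depth ≥ 6 then (st2.1 + p.2, st2.2) else st2)
    st

-- the while-frontier loop of Source B; fuel only totalizes it (same bound as in A's port)
def bLoop (g : List (Int × List Int)) (fuel : Nat) (depth total : Int)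
    (frontier : PySem.Dict Int Int) : Int :=
  match fuel with
  | 0 => total
  | f + 1 =>
    if frontier.items.isEmpty then total
    else
      let st := frontier.items.foldl (bVisit g (depth + 1)) (0, PySem.Dict.empty)
      bLoop g f (depth + 1) (total + st.1) st.2

def find_pathcount_alt (graph : List (Int × List Int)) (cur_node : Int) (explored_nodes : Int) (searched_len : Int) : Int :=
  if (graph.find? (fun kv => kv.1 == cur_node)).isSome then
    bLoop graph (graph.length + 1) (explored_nodes + 1) 0 (PySem.Dict.ofList [(cur_node, 1)])
  else if explored_nodes + 1 ≥ searched_len then 1 else 0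

-- ===== PRECONDITION & SPEC =====
def pvNbrs (g : List (Int × List Int)) (a : Int) : List Int :=
  match g.find? (fun kv => kv.1 == a) with | some kv => kv.2 | none => []

-- nodes reachable (in ≥ 1 steps) from the start set, as a transitive-closure iteration; g.length + 1
-- rounds suffice because a repetition-free path has at most g.length in-graph intermediate nodes
def pvReach (g : List (Int × List Int)) : Nat → List Int → List Int
  | 0, s => s
  | n + 1, s => pvReach g n (PySem.Set.update s (s.flatMap (pvNbrs g)))

def pvReachable (g : List (Int × List Int)) (a : Int) : List Int :=
  pvReach g (g.length + 1) (PySem.Set.ofList (pvNbrs g a))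

-- Pre_ excludes exactly the inputs on which the Python A never returns (RecursionError):
-- those where some node on a directed cycle is reachable from cur_node.
def Pre_find_pathcount (graph : List (Int × List Int)) (cur_node : Int) (explored_nodes : Int) (searched_len : Int) : Prop :=
  cur_node ∉ pvReachable graph cur_node ∧
  ∀ v ∈ pvReachable graph cur_node, v ∉ pvReachable graph v

instance (graph : List (Int × List Int)) (cur_node : Int) (explored_nodes : Int) (searched_len : Int) : Decidable (Pre_find_pathcount graph cur_node explored_nodes searched_len) := by unfold Pre_find_pathcount; infer_instance

def pvWitness_find_pathcount : (List (Int × List Int)) × Int × Int × Int :=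
  ([(1, [2, 2, 7]), (2, [3, 7]), (3, [7, 8])], 1, 0, 6)

def Spec_find_pathcount (graph : List (Int × List Int)) (cur_node : Int) (explored_nodes : Int) (searched_len : Int) (out : Int) : Prop := out = find_pathcount_alt graph cur_node explored_nodes searched_len
instance (graph : List (Int × List Int)) (cur_node : Int) (explored_nodes : Int) (searched_len : Int) (out : Int) : Decidable (Spec_find_pathcount graph cur_node explored_nodes searched_len out) := by unfold Spec_find_pathcount; infer_instance

-- ===== CLAIM (what is proved, stated in full; the proofs are below) =====
def Claim_equal_find_pathcount : Prop := ∀ (graph : List (Int × List Int)) (cur_node : Int) (explored_nodes : Int) (searched_len : Int), Dom_find_pathcount graph cur_node explored_nodes searched_len → Pre_find_pathcount graph cur_node explored_nodes searched_len → Spec_find_pathcount graph cur_node explored_nodes searched_len (find_pathcount graph cur_node explored_nodes searched_len)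

-- ===== LEMMAS AND PROOFS =====
-- weighted sum of a counter's items: Σ count(v) · w v
def wsum (w : Int → Int) (l : List (Int × Int)) : Int := (l.map (fun p => p.2 * w p.1)).sum

theorem wsum_nil (w : Int → Int) : wsum w [] = 0 := rfl

theorem wsum_cons (w : Int → Int) (p : Int × Int) (l : List (Int × Int)) :
    wsum w (p :: l) = p.2 * w p.1 + wsum w l := by simp [wsum]

theorem key_mem_of_mem (l : List (Int × Int)) (p : Int × Int) (h : p ∈ l) : p.1 ∈ l.map (·.1) :=
  List.mem_map.2 ⟨p, h, rfl⟩

-- replacing the (unique) entry at key k shifts the weighted sum by (new − old) · w k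
theorem wsum_replace (w : Int → Int) (l : List (Int × Int)) (k old new : Int)
    (hk : (k, old) ∈ l) (hnd : (l.map (·.1)).Nodup) :
    wsum w (l.map (fun p => if p.1 == k then (k, new) else p)) = wsum w l + (new - old) * w k := by
  induction l with
  | nil => cases hk
  | cons q t ih =>
    simp only [List.map_cons, List.nodup_cons] at hnd
    by_cases hq : q.1 = k
    · have hqe : q = (k, old) := by
        rcases List.mem_cons.1 hk with h | h
        · exact h.symm
        · exact absurd (by simpa [hq] using key_mem_of_mem t (k, old) h) hnd.1
      have ht : t.map (fun p => if p.1 == k then (k, new) else p) = t := by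
        conv_rhs => rw [← List.map_id t]
        apply List.map_congr_left
        intro p hp
        have : p.1 ≠ k := fun e => hnd.1 (by simpa [hq, e] using key_mem_of_mem t p hp)
        simp [this]
      subst hqe
      rw [List.map_cons]
      have hhead : (if (((k, old) : Int × Int).1 == k) = true then ((k, new) : Int × Int) else (k, old)) = (k, new) := by simp
      rw [hhead, wsum_cons, wsum_cons, ht]
      ring
    · have hk' : (k, old) ∈ t := by
        rcases List.mem_cons.1 hk with h | h
        · exact absurd (by rw [← h]) hq
        · exact h
      have ih' := ih hk' hnd.2
      rw [List.map_cons]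
      have hhead : (if (q.1 == k) = true then ((k, new) : Int × Int) else q) = q := by simp [hq]
      rw [hhead, wsum_cons, wsum_cons, ih']
      ring

theorem wsum_append (w : Int → Int) (l1 l2 : List (Int × Int)) :
    wsum w (l1 ++ l2) = wsum w l1 + wsum w l2 := by simp [wsum]

theorem wsum_insert (w : Int → Int) (d : PySem.Dict Int Int) (hnd : d.keys.Nodup) (k c : Int) :
    wsum w (d.insert k (d.getD k 0 + c)).items = wsum w d.items + c * w k := by
  by_cases hc : d.contains k = true
  · have hk : k ∈ d.items.map (·.1) := by
      simpa [PySem.Dict.keys] using (PySem.Dict.contains_iff_mem_keys d k).1 hc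
    rcases List.mem_map.1 hk with ⟨p, hp, hp1⟩
    have hpmem : (k, p.2) ∈ d.items := by
      have : p = (k, p.2) := by
        cases p; simp at hp1 ⊢; exact hp1
      rwa [← this]
    have hgetD : d.getD k 0 = p.2 :=
      PySem.Dict.getD_of_mem_items d hpmem hnd 0
    rw [PySem.Dict.items_insert_of_contains d _ hc]
    rw [wsum_replace w d.items k p.2 (d.getD k 0 + c) hpmem
        (by simpa [PySem.Dict.keys] using hnd)]
    rw [hgetD]; ring
  · have hc' : d.contains k = false := by simpa using hc
    rw [PySem.Dict.items_insert_of_not_contains d _ hc', wsum_append]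
    rw [PySem.Dict.getD_of_not_contains d 0 hc']
    simp [wsum]

def keyP (g : List (Int × List Int)) (v : Int) : Bool :=
  (g.find? (fun kv => kv.1 == v)).isSome

theorem fpA_zero_of_key (g : List (Int × List Int)) (v e s : Int)
    (h : keyP g v = true) : fpA g 0 v e s = 0 := by
  have h' : (g.find? (fun kv => kv.1 == v)).isSome = true := h
  rcases Option.isSome_iff_exists.1 h' with ⟨kv, hkv⟩
  simp [fpA, hkv]

theorem fpA_key_irrel (g : List (Int × List Int)) (f : Nat) (v e s s' : Int)
    (h : keyP g v = true) : fpA g f v e s = fpA g f v e s' := by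
  have h' : (g.find? (fun kv => kv.1 == v)).isSome = true := h
  rcases Option.isSome_iff_exists.1 h' with ⟨kv, hkv⟩
  cases f with
  | zero => rw [fpA, fpA]; simp only [hkv]
  | succ n => rw [fpA, fpA]; simp only [hkv]

theorem fpA_of_not_key (g : List (Int × List Int)) (f : Nat) (v e s : Int)
    (h : ¬ keyP g v = true) : fpA g f v e s = if e + 1 ≥ s then 1 else 0 := by
  have h' : g.find? (fun kv => kv.1 == v) = none := by
    cases hx : g.find? (fun kv => kv.1 == v) with
    | none => rfl
    | some kv => exact absurd (by simp [keyP, hx]) h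
  cases f <;> simp [fpA, h']

-- one inner loop (over the neighbour list L, parent count c, python's depth = d):
-- the running (total, nxt) state changes by c · Σ_{i ∈ L} fpA g f i (d-1) 6
theorem innerFold (g : List (Int × List Int)) (f : Nat) (d c : Int) (L : List Int) :
    ∀ st : Int × PySem.Dict Int Int, st.2.keys.Nodup → (∀ q ∈ st.2.items, keyP g q.1 = true) →
    (L.foldl
      (fun (st2 : Int × PySem.Dict Int Int) nb =>
        if (g.find? (fun kv => kv.1 == nb)).isSome then
          (st2.1, st2.2.insert nb (st2.2.getD nb 0 + c))
        else if d ≥ 6 then (st2.1 + c, st2.2) else st2)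
      st).2.keys.Nodup ∧
    (∀ q ∈ (L.foldl
      (fun (st2 : Int × PySem.Dict Int Int) nb =>
        if (g.find? (fun kv => kv.1 == nb)).isSome then
          (st2.1, st2.2.insert nb (st2.2.getD nb 0 + c))
        else if d ≥ 6 then (st2.1 + c, st2.2) else st2)
      st).2.items, keyP g q.1 = true) ∧
    (L.foldl
      (fun (st2 : Int × PySem.Dict Int Int) nb =>
        if (g.find? (fun kv => kv.1 == nb)).isSome then
          (st2.1, st2.2.insert nb (st2.2.getD nb 0 + c))
        else if d ≥ 6 then (st2.1 + c, st2.2) else st2)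
      st).1 +
      wsum (fun v => fpA g f v (d - 1) 6) (L.foldl
      (fun (st2 : Int × PySem.Dict Int Int) nb =>
        if (g.find? (fun kv => kv.1 == nb)).isSome then
          (st2.1, st2.2.insert nb (st2.2.getD nb 0 + c))
        else if d ≥ 6 then (st2.1 + c, st2.2) else st2)
      st).2.items
      = st.1 + wsum (fun v => fpA g f v (d - 1) 6) st.2.items
        + c * (L.map (fun i => fpA g f i (d - 1) 6)).sum := by
  induction L with
  | nil => intro st h1 h2; exact ⟨h1, h2, by simp⟩
  | cons nb L ih =>
    intro st h1 h2
    simp only [List.foldl_cons]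
    by_cases hk : (g.find? (fun kv => kv.1 == nb)).isSome
    · rw [if_pos hk]
      obtain ⟨r1, r2, r3⟩ := ih (st.1, st.2.insert nb (st.2.getD nb 0 + c))
        (by simpa [PySem.Dict.keys] using PySem.Dict.nodup_keys_insert st.2 nb _ (by simpa [PySem.Dict.keys] using h1))
        (by
          intro q hq
          rcases (PySem.Dict.mem_items_insert _ _ _ _).1 hq with h | h
          · subst h; simpa [keyP] using hk
          · exact h2 q h.1)
      refine ⟨r1, r2, ?_⟩
      rw [r3]
      rw [wsum_insert _ _ (by simpa [PySem.Dict.keys] using h1)]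
      simp only [List.map_cons, List.sum_cons]
      ring
    · rw [if_neg hk]
      by_cases hd : d ≥ 6
      · rw [if_pos hd]
        obtain ⟨r1, r2, r3⟩ := ih (st.1 + c, st.2) h1 h2
        refine ⟨r1, r2, ?_⟩
        rw [r3]
        simp only [List.map_cons, List.sum_cons]
        rw [fpA_of_not_key g f nb (d - 1) 6 (by simp [keyP, hk])]
        have h6 : d - 1 + 1 ≥ 6 := by omega
        rw [if_pos h6]
        ring
      · rw [if_neg hd]
        obtain ⟨r1, r2, r3⟩ := ih st h1 h2
        refine ⟨r1, r2, ?_⟩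
        rw [r3]
        simp only [List.map_cons, List.sum_cons]
        rw [fpA_of_not_key g f nb (d - 1) 6 (by simp [keyP, hk])]
        have h6 : ¬ d - 1 + 1 ≥ 6 := by omega
        rw [if_neg h6]
        ring

-- unfolding fpA at a key node: its value is the Σ the inner loop realises
theorem fpA_key_sum (g : List (Int × List Int)) (f : Nat) (v : Int) (d : Int)
    (kv : Int × List Int) (hkv : g.find? (fun p => p.1 == v) = some kv) :
    fpA g (f + 1) v (d - 2) 6 = (kv.2.map (fun i => fpA g f i (d - 1) 6)).sum := by
  rw [fpA]
  simp only [hkv]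
  have : ∀ (l : List Int) (a : Int),
      l.foldl (fun acc i => acc + fpA g f i (d - 2 + 1) 6) a
        = a + (l.map (fun i => fpA g f i (d - 1) 6)).sum := by
    intro l
    induction l with
    | nil => intro a; simp
    | cons x l ih =>
      intro a
      have he : d - 2 + 1 = d - 1 := by ring
      rw [List.foldl_cons, List.map_cons, List.sum_cons]
      rw [he] at ih ⊢
      rw [ih]
      ring
  rw [this]; ring

-- one whole level: folding bVisit over the frontier's items
theorem outerFold (g : List (Int × List Int)) (f : Nat) (d : Int) :
    ∀ (items : List (Int × Int)) (st : Int × PySem.Dict Int Int),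
    st.2.keys.Nodup → (∀ q ∈ st.2.items, keyP g q.1 = true) →
    (∀ p ∈ items, keyP g p.1 = true) →
    (items.foldl (bVisit g d) st).2.keys.Nodup ∧
    (∀ q ∈ (items.foldl (bVisit g d) st).2.items, keyP g q.1 = true) ∧
    (items.foldl (bVisit g d) st).1 +
        wsum (fun v => fpA g f v (d - 1) 6) (items.foldl (bVisit g d) st).2.items
      = st.1 + wsum (fun v => fpA g f v (d - 1) 6) st.2.items
        + wsum (fun v => fpA g (f + 1) v (d - 2) 6) items := by
  intro items
  induction items with
  | nil => intro st h1 h2 _; exact ⟨h1, h2, by simp [wsum]⟩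
  | cons p items ih =>
    intro st h1 h2 h3
    have h' : (g.find? (fun kv => kv.1 == p.1)).isSome = true := h3 p List.mem_cons_self
    rcases Option.isSome_iff_exists.1 h' with ⟨kv, hkv⟩
    have hbv : bVisit g d st p = kv.2.foldl
        (fun (st2 : Int × PySem.Dict Int Int) nb =>
          if (g.find? (fun kv => kv.1 == nb)).isSome then
            (st2.1, st2.2.insert nb (st2.2.getD nb 0 + p.2))
          else if d ≥ 6 then (st2.1 + p.2, st2.2) else st2)
        st := by
      simp only [bVisit, hkv]
    obtain ⟨s1, s2, s3⟩ := innerFold g f d p.2 kv.2 st h1 h2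
    rw [← hbv] at s1 s2 s3
    simp only [List.foldl_cons]
    obtain ⟨r1, r2, r3⟩ := ih (bVisit g d st p) s1 s2 (fun q hq => h3 q (List.mem_cons_of_mem _ hq))
    refine ⟨r1, r2, ?_⟩
    rw [r3, s3, wsum_cons, fpA_key_sum g f p.1 d kv hkv]
    ring

-- the while loop realises the weighted sum of A's recursion over the frontier
theorem bLoop_eq (g : List (Int × List Int)) (fuel : Nat) :
    ∀ (depth total : Int) (fr : PySem.Dict Int Int), fr.keys.Nodup →
    (∀ p ∈ fr.items, keyP g p.1 = true) →
    bLoop g fuel depth total fr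
      = total + wsum (fun v => fpA g fuel v (depth - 1) 6) fr.items := by
  induction fuel with
  | zero =>
    intro depth total fr _ hkeys
    rw [bLoop]
    have : wsum (fun v => fpA g 0 v (depth - 1) 6) fr.items = 0 := by
      unfold wsum
      apply List.sum_eq_zero
      intro x hx
      rcases List.mem_map.1 hx with ⟨p, hp, hpx⟩
      rw [← hpx]
      simp [fpA_zero_of_key g p.1 (depth - 1) 6 (hkeys p hp)]
    rw [this]; ring
  | succ f ih =>
    intro depth total fr hnd hkeys
    rw [bLoop]
    by_cases hemp : fr.items.isEmpty
    · rw [if_pos hemp]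
      have : fr.items = [] := List.isEmpty_iff.1 hemp
      rw [this, wsum_nil]; ring
    · rw [if_neg hemp]
      obtain ⟨r1, r2, r3⟩ := outerFold g f (depth + 1) fr.items (0, PySem.Dict.empty)
        (by simp [PySem.Dict.keys, PySem.Dict.empty]) (by simp [PySem.Dict.empty]) hkeys
      simp only
      rw [ih (depth + 1) _ _ r1 r2]
      have he1 : depth + 1 - 1 = depth := by ring
      have he2 : depth + 1 - 2 = depth - 1 := by ring
      rw [he1, he2] at r3
      have hz : wsum (fun v => fpA g f v depth 6) (PySem.Dict.empty : PySem.Dict Int Int).items = 0 := by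
        simp [wsum, PySem.Dict.empty]
      rw [hz] at r3
      have he1' : depth + 1 - 1 = depth := by ring
      rw [he1']
      omega

-- ===== VERDICT (by name: the statement is the Claim_ definition above) =====
theorem find_pathcount_spec : Claim_equal_find_pathcount := by
  intro g c e s _ _
  unfold Spec_find_pathcount find_pathcount find_pathcount_alt
  by_cases hk : (g.find? (fun kv => kv.1 == c)).isSome
  · rw [if_pos hk]
    rcases Option.isSome_iff_exists.1 hk with ⟨kv, hkv⟩
    have hitems : (PySem.Dict.ofList [((c : Int), (1 : Int))]).items = [(c, 1)] := rfl
    rw [bLoop_eq g (g.length + 1) (e + 1) 0 (PySem.Dict.ofList [(c, 1)])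
        (PySem.Dict.nodup_keys_ofList _)
        (by
          intro p hp
          rw [hitems] at hp
          have hp' : p = (c, 1) := by simpa using hp
          rw [hp']
          exact hk)]
    rw [hitems, wsum_cons, wsum_nil]
    have he : e + 1 - 1 = e := by ring
    rw [he, fpA_key_irrel g (g.length + 1) c e s 6 (by simpa [keyP] using hk)]
    ring
  · rw [if_neg hk]
    rw [fpA_of_not_key g (g.length + 1) c e s (by simpa [keyP] using hk)]
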